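-- pv_equiv track=rewrite | github.com/rohantib/lcs-suffix | filelcsSuffix.py | is_equal_lms
-- ===== SOURCE A (Python) =====
-- def is_LMS(is_S_typemap, index):
--     return index != 0 and is_S_typemap[index] and not is_S_typemap[index-1]
--
-- def is_equal_lms(string, is_S_typemap, indA, indB):
--     """ Compare two LMS substrings to be exactly equal - assumes input is LMS index """
--     if indA == len(string) or indB == len(string):
--         return False
--
--     pos = 0
--     while True:
--         a_is_LMS = is_LMS(is_S_typemap, indA + pos)
--         b_is_LMS = is_LMS(is_S_typemap, indB + pos)
--
--         # Reached the end of one LMS substring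
--         if a_is_LMS != b_is_LMS:
--             return False
--
--         # Characters are different
--         if string[indA+pos] != string[indB+pos]:
--             return False
--
--         # Reached next LMS substring
--         if pos > 0 and a_is_LMS and b_is_LMS:
--             return True
--         pos += 1
-- ===== SOURCE B (Python) =====
-- def is_LMS(is_S_typemap, index):
--     return index != 0 and is_S_typemap[index] and not is_S_typemap[index-1]
--
-- def next_lms_offset(is_S_typemap, ind):
--     """Offset (>= 1) from ind to the next LMS index."""
--     pos = 1
--     while not is_LMS(is_S_typemap, ind + pos):
--         pos += 1
--     return pos
--
-- def is_equal_lms(string, is_S_typemap, indA, indB):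
--     """ Compare two LMS substrings to be exactly equal - assumes input is LMS index """
--     if indA == len(string) or indB == len(string):
--         return False
--     if is_LMS(is_S_typemap, indA) != is_LMS(is_S_typemap, indB):
--         return False
--     extA = next_lms_offset(is_S_typemap, indA)
--     extB = next_lms_offset(is_S_typemap, indB)
--     if extA != extB:
--         return False
--     return string[indA:indA+extA+1] == string[indB:indB+extB+1]
-- ===== Notes on version B (the rewrite author's own statement) =====
-- stated objective: alternative
-- what changed: Replaces A's single fused loop (per-position LMS-status and character checks interleaved) by a boundaries-first decomposition: find each side's next-LMS offset with a dedicated scan, return False if the offsets (or the start LMS statuses) differ, otherwise compare the two substrings including the boundary character with one slice comparison.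
-- outside the precondition, e.g. on is_equal_lms('ab', [True, True], 0, 1): A returns False, B raises IndexError; on is_equal_lms('bbbb', [False, True, False, True], -1, 1): A returns True, B returns False
import Mathlib
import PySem

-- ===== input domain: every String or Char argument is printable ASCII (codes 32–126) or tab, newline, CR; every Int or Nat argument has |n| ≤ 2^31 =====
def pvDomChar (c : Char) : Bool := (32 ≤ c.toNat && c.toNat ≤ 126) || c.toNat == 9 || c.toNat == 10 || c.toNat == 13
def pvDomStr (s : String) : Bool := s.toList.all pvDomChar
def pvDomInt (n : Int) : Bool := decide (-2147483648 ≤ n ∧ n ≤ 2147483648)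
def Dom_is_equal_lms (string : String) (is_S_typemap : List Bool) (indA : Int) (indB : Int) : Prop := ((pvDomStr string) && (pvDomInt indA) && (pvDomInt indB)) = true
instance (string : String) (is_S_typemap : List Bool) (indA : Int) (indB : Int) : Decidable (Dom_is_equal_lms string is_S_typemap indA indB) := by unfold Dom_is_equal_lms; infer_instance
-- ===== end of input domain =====

-- B replaces A's fused per-position loop by a boundaries-first decomposition (find each side's
-- next-LMS offset, then one slice comparison); alternative structure, same cost.

-- ===== PORT A =====

-- port of is_LMS (module helper used by both A and B); out-of-range reads occur only outside Pre_
def pvIsLMS (m : List Bool) (i : Int) : Bool :=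
  i != 0 && ((PySem.List.pyGet? m i).getD false) && !((PySem.List.pyGet? m (i - 1)).getD false)

-- A's 'while True' loop; the fuel argument only makes it total (under Pre_ it returns first)
def pvLoopA (s : List Char) (m : List Bool) (iA iB : Int) : Nat → Int → Bool
  | 0, _ => false
  | fuel + 1, pos =>
    let aL := pvIsLMS m (iA + pos)
    let bL := pvIsLMS m (iB + pos)
    if aL != bL then false
    else if PySem.List.pyGet? s (iA + pos) != PySem.List.pyGet? s (iB + pos) then false
    else if decide (0 < pos) && aL && bL then true
    else pvLoopA s m iA iB fuel (pos + 1)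

def is_equal_lms (string : String) (is_S_typemap : List Bool) (indA : Int) (indB : Int) : Bool :=
  if indA = (string.toList.length : Int) ∨ indB = (string.toList.length : Int) then false
  else pvLoopA string.toList is_S_typemap indA indB (string.toList.length + 1) 0

-- ===== PORT B =====

-- next_lms_offset: scan pos = 1, 2, … until is_LMS(ind+pos); the fuel argument only makes it total
def pvNextOff (m : List Bool) (ind : Int) : Nat → Int → Int
  | 0, pos => pos
  | fuel + 1, pos => if pvIsLMS m (ind + pos) then pos else pvNextOff m ind fuel (pos + 1)

def is_equal_lms_alt (string : String) (is_S_typemap : List Bool) (indA : Int) (indB : Int) : Bool :=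
  if indA = (string.toList.length : Int) ∨ indB = (string.toList.length : Int) then false
  else if pvIsLMS is_S_typemap indA != pvIsLMS is_S_typemap indB then false
  else
    let extA := pvNextOff is_S_typemap indA (is_S_typemap.length + 1) 1
    let extB := pvNextOff is_S_typemap indB (is_S_typemap.length + 1) 1
    if extA ≠ extB then false
    else decide (PySem.List.slice string.toList (some indA) (some (indA + extA + 1))
               = PySem.List.slice string.toList (some indB) (some (indB + extB + 1)))

-- ===== PRECONDITION & SPEC =====

-- Pre_ admits the inputs on which A provably returns without an out-of-range read: either an index
-- equals len(string) (immediate False); or the LMS statuses of the two start indices are readable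
-- under Python's index semantics and differ, so both programs return False at position 0; or the
-- indices lie in [0, len], the type map matches the string and each index is followed by a further
-- LMS position (the natural domain; the docstring says "assumes input is LMS index" and the
-- caller's sentinel guarantees the next LMS position). Outside Pre_ A either raises IndexError
-- mid-scan or returns a value depending on incidental scan state (a character mismatch hit just
-- before running off the arrays, negative-index wraparound agreement), and B's boundary scan
-- raises IndexError on most such inputs.
def Pre_is_equal_lms (string : String) (is_S_typemap : List Bool) (indA : Int) (indB : Int) : Prop :=
  indA = (string.toList.length : Int) ∨ indB = (string.toList.length : Int) ∨
  (((indA = 0 ∨ (-(is_S_typemap.length : Int) ≤ indA ∧ indA < (is_S_typemap.length : Int) ∧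
      ((PySem.List.pyGet? is_S_typemap indA).getD false = true →
        1 - (is_S_typemap.length : Int) ≤ indA))) ∧
    (indB = 0 ∨ (-(is_S_typemap.length : Int) ≤ indB ∧ indB < (is_S_typemap.length : Int) ∧
      ((PySem.List.pyGet? is_S_typemap indB).getD false = true →
        1 - (is_S_typemap.length : Int) ≤ indB))) ∧
    ¬ ((indA != 0 && ((PySem.List.pyGet? is_S_typemap indA).getD false)
          && !((PySem.List.pyGet? is_S_typemap (indA - 1)).getD false))
      = (indB != 0 && ((PySem.List.pyGet? is_S_typemap indB).getD false)
          && !((PySem.List.pyGet? is_S_typemap (indB - 1)).getD false)))) ∨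
   (0 ≤ indA ∧ indA ≤ string.toList.length ∧ 0 ≤ indB ∧ indB ≤ string.toList.length ∧
    is_S_typemap.length = string.toList.length ∧
    (∃ j : Nat, j < string.toList.length ∧ indA < (j : Int) ∧
       is_S_typemap.getD j false = true ∧ is_S_typemap.getD (j - 1) false = false) ∧
    (∃ j : Nat, j < string.toList.length ∧ indB < (j : Int) ∧
       is_S_typemap.getD j false = true ∧ is_S_typemap.getD (j - 1) false = false)))
instance (string : String) (is_S_typemap : List Bool) (indA : Int) (indB : Int) : Decidable (Pre_is_equal_lms string is_S_typemap indA indB) := by unfold Pre_is_equal_lms; infer_instance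

def pvWitness_is_equal_lms : String × List Bool × Int × Int := ("ab", [false, true], 0, 0)

def Spec_is_equal_lms (string : String) (is_S_typemap : List Bool) (indA : Int) (indB : Int) (out : Bool) : Prop := out = is_equal_lms_alt string is_S_typemap indA indB
instance (string : String) (is_S_typemap : List Bool) (indA : Int) (indB : Int) (out : Bool) : Decidable (Spec_is_equal_lms string is_S_typemap indA indB out) := by unfold Spec_is_equal_lms; infer_instance

-- ===== CLAIM =====

def Claim_equal_is_equal_lms : Prop := ∀ (string : String) (is_S_typemap : List Bool) (indA : Int) (indB : Int), Dom_is_equal_lms string is_S_typemap indA indB → Pre_is_equal_lms string is_S_typemap indA indB → Spec_is_equal_lms string is_S_typemap indA indB (is_equal_lms string is_S_typemap indA indB)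

-- ===== LEMMAS AND PROOFS =====

theorem pvIsLMS_natCast (m : List Bool) (j : Nat) (hj : j < m.length) :
    pvIsLMS m (j : Int)
      = (decide (j ≠ 0) && m.getD j false && !(m.getD (j - 1) false)) := by
  unfold pvIsLMS
  rcases Nat.eq_zero_or_pos j with h0 | h0
  · subst h0; simp
  · have h1 : ((j : Int) - 1) = ((j - 1 : Nat) : Int) := by omega
    rw [h1]
    have hj1 : j - 1 < m.length := by omega
    simp [List.getD_eq_getElem?_getD, hj, hj1]
    have h2 : (j : Int) ≠ 0 := by exact_mod_cast h0.ne'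
    have h3 : ((j : Int) != 0) = true := by simpa using h2
    rw [h3]; simp [h0.ne']

theorem pvNextOff_succ (m : List Bool) (ind : Int) (f : Nat) (pos : Int) :
    pvNextOff m ind (f + 1) pos
      = if pvIsLMS m (ind + pos) then pos else pvNextOff m ind f (pos + 1) := rfl

theorem pvNextOff_eq (m : List Bool) (a d : Nat)
    (htop : pvIsLMS m ((a + d : Nat) : Int) = true)
    (hmin : ∀ k : Nat, 1 ≤ k → k < d → pvIsLMS m ((a + k : Nat) : Int) = false) :
    ∀ (fuel pos : Nat), 1 ≤ pos → pos ≤ d → d - pos < fuel →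
      pvNextOff m (a : Int) fuel (pos : Int) = (d : Int) := by
  intro fuel
  induction fuel with
  | zero => intro pos h1 h2 h3; omega
  | succ f ih =>
    intro pos h1 h2 h3
    have hcast : (a : Int) + (pos : Int) = ((a + pos : Nat) : Int) := by push_cast; ring
    rcases eq_or_lt_of_le h2 with he | hlt
    · subst he
      rw [pvNextOff_succ, hcast, htop]; simp
    · have hf : pvIsLMS m ((a + pos : Nat) : Int) = false := hmin pos h1 hlt
      rw [pvNextOff_succ, hcast, hf]
      simp only [if_false, Bool.false_eq_true]
      have hc2 : ((pos : Int) + 1) = ((pos + 1 : Nat) : Int) := by push_cast; ring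
      rw [hc2]
      exact ih (pos + 1) (by omega) (by omega) (by omega)

theorem pvLoopA_succ (s : List Char) (m : List Bool) (iA iB : Int) (f : Nat) (pos : Int) :
    pvLoopA s m iA iB (f + 1) pos
      = (if pvIsLMS m (iA + pos) != pvIsLMS m (iB + pos) then false
         else if PySem.List.pyGet? s (iA + pos) != PySem.List.pyGet? s (iB + pos) then false
         else if decide (0 < pos) && pvIsLMS m (iA + pos) && pvIsLMS m (iB + pos) then true
         else pvLoopA s m iA iB f (pos + 1)) := rfl

theorem pvLoopA_eq (s : List Char) (m : List Bool) (a b dA dB : Nat)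
    (hdA : 1 ≤ dA) (hdB : 1 ≤ dB)
    (hrA : a + dA < s.length) (hrB : b + dB < s.length)
    (htopA : pvIsLMS m ((a + dA : Nat) : Int) = true)
    (htopB : pvIsLMS m ((b + dB : Nat) : Int) = true)
    (hminA : ∀ k : Nat, 1 ≤ k → k < dA → pvIsLMS m ((a + k : Nat) : Int) = false)
    (hminB : ∀ k : Nat, 1 ≤ k → k < dB → pvIsLMS m ((b + k : Nat) : Int) = false) :
    ∀ (fuel pos : Nat), pos ≤ dA → pos ≤ dB → min dA dB - pos < fuel →
      (pos = 0 → pvIsLMS m (a : Int) = pvIsLMS m (b : Int)) →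
      pvLoopA s m (a : Int) (b : Int) fuel (pos : Int)
        = (decide (dA = dB)
            && decide ((s.drop (a + pos)).take (dA - pos + 1)
                     = (s.drop (b + pos)).take (dB - pos + 1))) := by
  intro fuel
  induction fuel with
  | zero => intro pos _ _ h3 _; omega
  | succ f ih =>
    intro pos hpA hpB hfuel h0
    have hcA : (a : Int) + (pos : Int) = ((a + pos : Nat) : Int) := by push_cast; ring
    have hcB : (b : Int) + (pos : Int) = ((b + pos : Nat) : Int) := by push_cast; ring
    have hlA : a + pos < s.length := by omega
    have hlB : b + pos < s.length := by omega
    have hxA : PySem.List.pyGet? s ((a + pos : Nat) : Int) = some (s[a + pos]'hlA) := by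
      rw [PySem.List.pyGet?_natCast]; exact List.getElem?_eq_getElem hlA
    have hxB : PySem.List.pyGet? s ((b + pos : Nat) : Int) = some (s[b + pos]'hlB) := by
      rw [PySem.List.pyGet?_natCast]; exact List.getElem?_eq_getElem hlB
    have hdropA : s.drop (a + pos) = s[a + pos]'hlA :: s.drop (a + pos + 1) :=
      List.drop_eq_getElem_cons hlA
    have hdropB : s.drop (b + pos) = s[b + pos]'hlB :: s.drop (b + pos + 1) :=
      List.drop_eq_getElem_cons hlB
    rw [pvLoopA_succ, hcA, hcB, hxA, hxB]
    by_cases hA : pos = dA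
    · by_cases hB : pos = dB
      · -- pos = dA = dB : both at their boundary
        subst hA; subst hB
        rw [htopA, htopB]
        have h1 : pos - pos + 1 = 1 := by omega
        rw [h1]
        have hp : decide (0 < (pos : Int)) = true := by
          simp only [decide_eq_true_eq]; exact_mod_cast hdA
        rw [hp, hdropA, hdropB]
        simp only [List.take_succ_cons, List.take_zero]
        by_cases hch : s[a + pos]'hlA = s[b + pos]'hlB
        · simp [hch]
        · simp [hch]
      · -- pos = dA, pos < dB
        subst hA
        have hbl : pvIsLMS m ((b + pos : Nat) : Int) = false := hminB pos (by omega) (by omega)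
        rw [htopA, hbl]
        simp [hB]
    · by_cases hB : pos = dB
      · -- pos = dB, pos < dA
        subst hB
        have hal : pvIsLMS m ((a + pos : Nat) : Int) = false := hminA pos (by omega) (by omega)
        rw [htopB, hal]
        simp [Ne.symm hA]
      · -- pos < dA, pos < dB
        have hposA : pos < dA := by omega
        have hposB : pos < dB := by omega
        have heq : pvIsLMS m ((a + pos : Nat) : Int) = pvIsLMS m ((b + pos : Nat) : Int) := by
          rcases Nat.eq_zero_or_pos pos with hz | hpos
          · subst hz
            simpa using h0 rfl
          · rw [hminA pos hpos hposA, hminB pos hpos hposB]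
        have hnt : (decide (0 < (pos : Int)) && pvIsLMS m ((a + pos : Nat) : Int)
                     && pvIsLMS m ((b + pos : Nat) : Int)) = false := by
          rcases Nat.eq_zero_or_pos pos with hz | hpos
          · subst hz; simp
          · rw [hminA pos hpos hposA]; simp
        rw [hnt, heq, bne_self_eq_false]
        by_cases hch : s[a + pos]'hlA = s[b + pos]'hlB
        · -- equal heads: recurse
          have hbne : (some (s[a + pos]'hlA) != some (s[b + pos]'hlB)) = false := by
            simp [hch]
          rw [hbne]
          simp only [if_false, Bool.false_eq_true]
          have hc2 : ((pos : Int) + 1) = ((pos + 1 : Nat) : Int) := by push_cast; ring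
          rw [hc2, ih (pos + 1) (by omega) (by omega) (by omega) (by omega)]
          congr 1
          rw [decide_eq_decide]
          have e1 : dA - pos + 1 = (dA - (pos + 1) + 1) + 1 := by omega
          have e2 : dB - pos + 1 = (dB - (pos + 1) + 1) + 1 := by omega
          have e3 : a + pos + 1 = a + (pos + 1) := by omega
          have e4 : b + pos + 1 = b + (pos + 1) := by omega
          rw [hdropA, hdropB, e1, e2, List.take_succ_cons, List.take_succ_cons,
              List.cons_eq_cons, e3, e4]
          simp [hch]
        · -- different heads: both sides false
          have hbne : (some (s[a + pos]'hlA) != some (s[b + pos]'hlB)) = true := by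
            simp [hch]
          rw [hbne]
          simp only [if_true]
          by_cases hd : dA = dB
          · subst hd
            rw [hdropA, hdropB]
            rw [List.take_succ_cons, List.take_succ_cons]
            simp [hch]
          · simp [hd]

-- Turn one of Pre_'s existentials (via its least witness) into the boundary/minimality facts
-- about pvIsLMS that the two loop lemmas consume.
theorem pv_boundary (m : List Bool) (n : Nat) (hm : m.length = n) (i : Int) (hi0 : 0 ≤ i)
    (hex : ∃ j : Nat, j < n ∧ i < (j : Int) ∧ m.getD j false = true ∧ m.getD (j - 1) false = false) :
    ∃ d : Nat, 1 ≤ d ∧ i.toNat + d < n ∧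
      pvIsLMS m ((i.toNat + d : Nat) : Int) = true ∧
      (∀ k : Nat, 1 ≤ k → k < d → pvIsLMS m ((i.toNat + k : Nat) : Int) = false) := by
  classical
  set a := i.toNat with ha
  have hia : i = (a : Int) := (Int.toNat_of_nonneg hi0).symm
  let j0 := Nat.find hex
  obtain ⟨hj0n, hj0gt, hj0t, hj0f⟩ := Nat.find_spec hex
  have haj : a < j0 := by omega
  refine ⟨j0 - a, by omega, by omega, ?_, ?_⟩
  · have he : a + (j0 - a) = j0 := by omega
    rw [he, pvIsLMS_natCast m j0 (by omega)]
    have : j0 ≠ 0 := by omega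
    simp only [List.getD_eq_getElem?_getD] at hj0t hj0f
    simp [this]
    exact ⟨hj0t, hj0f⟩
  · intro k hk1 hkd
    have hlt : a + k < j0 := by omega
    have hmin := Nat.find_min hex hlt
    rw [pvIsLMS_natCast m (a + k) (by omega)]
    have hne : a + k ≠ 0 := by omega
    simp only [hne, ne_eq, not_false_eq_true, decide_true, Bool.true_and]
    by_cases hx : m.getD (a + k) false = true
    · by_cases hy : m.getD (a + k - 1) false = false
      · exact absurd ⟨by omega, by omega, hx, hy⟩ hmin
      · have hy' := eq_true_of_ne_false hy
        simp only [List.getD_eq_getElem?_getD] at hx hy'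
        simp [hx, hy']
    · have hx' := eq_false_of_ne_true hx
      simp only [List.getD_eq_getElem?_getD] at hx'
      simp [hx']

-- ===== VERDICT =====

theorem is_equal_lms_spec : Claim_equal_is_equal_lms := by
  intro str m iA iB _ hpre
  unfold Spec_is_equal_lms is_equal_lms is_equal_lms_alt
  by_cases hg : iA = (str.toList.length : Int) ∨ iB = (str.toList.length : Int)
  · rw [if_pos hg, if_pos hg]
  · rw [if_neg hg, if_neg hg]
    push_neg at hg
    by_cases hstat : pvIsLMS m iA = pvIsLMS m iB
    · -- same LMS status at the two start indices: Pre_'s last disjunct must hold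
      rcases hpre with h | h | ⟨_, _, hne⟩ | h
      · exact absurd h hg.1
      · exact absurd h hg.2
      · -- statuses readable and different: contradicts hstat
        exact absurd hstat hne
      · obtain ⟨hA0, hAle, hB0, hBle, hm, hexA, hexB⟩ := h
        obtain ⟨dA, hdA1, hrA, htopA, hminA⟩ :=
          pv_boundary m str.toList.length hm iA hA0 hexA
        obtain ⟨dB, hdB1, hrB, htopB, hminB⟩ :=
          pv_boundary m str.toList.length hm iB hB0 hexB
        have hia : iA = (iA.toNat : Int) := (Int.toNat_of_nonneg hA0).symm
        have hib : iB = (iB.toNat : Int) := (Int.toNat_of_nonneg hB0).symm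
        rw [hia, hib]
        rw [hia, hib] at hstat
        have hbne : (pvIsLMS m (iA.toNat : Int) != pvIsLMS m (iB.toNat : Int)) = false := by
          rw [bne_eq_false_iff_eq]; exact hstat
        rw [hbne]
        simp only [if_false, Bool.false_eq_true]
        -- A's loop
        have hloop := pvLoopA_eq str.toList m iA.toNat iB.toNat dA dB hdA1 hdB1 hrA hrB
          htopA htopB hminA hminB (str.toList.length + 1) 0 (by omega) (by omega) (by omega)
          (fun _ => hstat)
        simp only [Nat.cast_zero] at hloop
        rw [hloop]
        -- B's offsets
        have hoffA := pvNextOff_eq m iA.toNat dA htopA hminA (m.length + 1) 1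
          (by omega) (by omega) (by omega)
        have hoffB := pvNextOff_eq m iB.toNat dB htopB hminB (m.length + 1) 1
          (by omega) (by omega) (by omega)
        simp only [Nat.cast_one] at hoffA hoffB
        rw [hoffA, hoffB]
        -- B's slices
        have hsA : (iA.toNat : Int) + (dA : Int) + 1 = ((iA.toNat + dA + 1 : Nat) : Int) := by
          push_cast; ring
        have hsB : (iB.toNat : Int) + (dB : Int) + 1 = ((iB.toNat + dB + 1 : Nat) : Int) := by
          push_cast; ring
        rw [hsA, hsB, PySem.List.slice_natCast, PySem.List.slice_natCast]
        have htA : iA.toNat + dA + 1 - iA.toNat = dA + 1 := by omega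
        have htB : iB.toNat + dB + 1 - iB.toNat = dB + 1 := by omega
        rw [htA, htB]
        simp only [Nat.add_zero, Nat.sub_zero]
        by_cases hd : dA = dB
        · subst hd
          rw [if_neg (by simp)]
          simp
        · rw [if_pos (by exact_mod_cast hd)]
          simp [hd]
    · -- different LMS status at the start indices: both return False at once
      have hbne : (pvIsLMS m iA != pvIsLMS m iB) = true := by
        rw [bne_iff_ne]; exact hstat
      rw [hbne]
      simp only [if_true]
      rw [pvLoopA_succ]
      simp only [add_zero, hbne, if_true]
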